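-- pv_equiv track=rewrite | github.com/Budmeister/budc | output_analyzer.py | read_one_state
-- ===== SOURCE A (Python) =====
-- def read_one_state(words):
--     try:
--         next_arrow = words.index("->")
--     except ValueError:
--         next_arrow = -1
--     state = []  # state = [(der, look), ...]
--     while 1:
--         arrow = next_arrow
--         if arrow == -1:
--             break
--         try:
--             next_arrow = words.index("->", arrow+1)
--         except ValueError:
--             next_arrow = -1
--         der = words[arrow-1] + " -> " + words[arrow+1][:-1] # last character in "to" should be comma
--         if next_arrow != -1:
--             look = " ".join(words[arrow+2:next_arrow-1])[:-1]
--         else: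
--             look = " ".join(words[arrow+2:])
--         state.append((der, look))
--     return state
-- ===== SOURCE B (Python) =====
-- def read_one_state(words):
--     # One-pass token-stream state machine: no index arithmetic, no searching,
--     # no slicing of the word list; state moves scan -> to -> look as tokens arrive.
--     out = []
--     prev = ""
--     lhs = ""
--     der = ""
--     toks = []
--     mode = "scan"
--     for w in words:
--         if mode == "to":
--             der = lhs + " -> " + w[:-1]
--             toks = []
--             mode = "look"
--         elif mode == "look" and w != "->":
--             toks.append(w)
--         if w == "->":
--             if mode == "look":
--                 out.append((der, " ".join(toks[:-1])[:-1]))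
--             lhs = prev
--             mode = "to"
--         prev = w
--     if mode == "look":
--         out.append((der, " ".join(toks)))
--     return out
-- ===== Notes on version B (the rewrite author's own statement) =====
-- stated objective: alternative
-- what changed: Replaces A's index-resumption loop (repeated words.index('->', arrow+1) plus arithmetic slicing of the word list) by a single streaming pass: a three-mode state machine (scan/to/look) that consumes one token at a time, tracking the previous word and accumulating lookahead tokens, with no index arithmetic, searching or slicing.
-- intended difference: When the first word is '->' (and the last word is nonempty), A's words[arrow-1] wraps to the LAST word of the list and glues it in as the left-hand side of the first derivation; B returns an empty left-hand side there, which is the intended reading of a malformed leading arrow. — e.g. on read_one_state(["->", "E,", "x"]): A returns [("x -> E", "x")], B returns [(" -> E", "x")]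
import Mathlib
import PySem

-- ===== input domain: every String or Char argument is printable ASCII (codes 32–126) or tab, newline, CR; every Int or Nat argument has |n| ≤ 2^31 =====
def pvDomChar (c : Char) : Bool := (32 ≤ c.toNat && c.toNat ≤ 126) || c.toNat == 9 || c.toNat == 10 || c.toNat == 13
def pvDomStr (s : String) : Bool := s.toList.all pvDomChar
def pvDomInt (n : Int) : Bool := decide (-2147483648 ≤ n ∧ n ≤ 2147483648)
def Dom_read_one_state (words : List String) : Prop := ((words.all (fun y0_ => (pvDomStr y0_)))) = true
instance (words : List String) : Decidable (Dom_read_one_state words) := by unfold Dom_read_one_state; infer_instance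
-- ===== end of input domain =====

-- B replaces A's index-search/slicing loop by a one-pass streaming state machine (scan/to/look) over the tokens;
-- on inputs whose FIRST word is "->" (D_ below) A's words[arrow-1] wraps to the LAST word while B uses an empty left-hand side.


-- ===== PORT A =====
-- words.index(v, start) with -1 for ValueError (A's try/except); exact for 0 ≤ start, which holds at every call site (start is 0 or arrow+1 with arrow ≥ 0).
def pvIndexFrom (words : List String) (v : String) (start : Int) : Int :=
  match PySem.List.index? (words.drop start.toNat) v with
  | none => -1
  | some k => (k : Int) + start

-- A's 'while 1' loop; the fuel argument only makes the same computation total: arrow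
-- positions strictly increase inside [0, len), so words.length + 1 steps always suffice.
def loopA (words : List String) : Nat → Int → List (String × String) → List (String × String)
  | 0, _, state => state
  | fuel + 1, arrow, state =>
    if arrow = -1 then state
    else
      let next := pvIndexFrom words "->" (arrow + 1)
      let der := PySem.List.pyGetD words (arrow - 1) "" ++ " -> " ++
        PySem.Str.slice (PySem.List.pyGetD words (arrow + 1) "") none (some (-1))
      let look := if next ≠ -1 then
          PySem.Str.slice (PySem.Str.join " " (PySem.List.slice words (some (arrow + 2)) (some (next - 1)))) none (some (-1))
        else PySem.Str.join " " (PySem.List.slice words (some (arrow + 2)) none)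
      loopA words fuel next (state ++ [(der, look)])

def read_one_state (words : List String) : List (String × String) :=
  loopA words (words.length + 1) (pvIndexFrom words "->" 0) []

-- ===== PORT B =====
-- one step of Source B's for-loop; state = (out, prev, lhs, der, toks, mode)
def stepB (s : List (String × String) × String × String × String × List String × String) (w : String) :
    List (String × String) × String × String × String × List String × String :=
  match s with
  | (out, prev, lhs, der, toks, mode) =>
    let dtm : String × List String × String :=
      if mode = "to" then (lhs ++ " -> " ++ PySem.Str.slice w none (some (-1)), ([] : List String), "look")
      else if mode = "look" ∧ w ≠ "->" then (der, toks ++ [w], mode)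
      else (der, toks, mode)
    match dtm with
    | (der, toks, mode) =>
      let olm : List (String × String) × String × String :=
        if w = "->" then
          ((if mode = "look" then
              out ++ [(der, PySem.Str.slice (PySem.Str.join " " (PySem.List.slice toks none (some (-1)))) none (some (-1)))]
            else out), prev, "to")
        else (out, lhs, mode)
      match olm with
      | (out, lhs, mode) => (out, w, lhs, der, toks, mode)

def read_one_state_alt (words : List String) : List (String × String) :=
  match words.foldl stepB ([], "", "", "", [], "scan") with
  | (out, _, _, der, toks, mode) =>
    if mode = "look" then out ++ [(der, PySem.Str.join " " toks)] else out

-- ===== PRECONDITION & SPEC =====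
-- A raises IndexError (at words[arrow+1]) exactly when the last word is "->"; those inputs are excluded.
def Pre_read_one_state (words : List String) : Prop := words.getLast? ≠ some "->"
instance (words : List String) : Decidable (Pre_read_one_state words) := by unfold Pre_read_one_state; infer_instance
def pvWitness_read_one_state : List String := ["S'", "->", "E,", "$"]

-- When the first word is "->" (and the last word is nonempty), A's words[arrow-1] silently wraps around to the
-- LAST word of the line and glues it in as the left-hand side of the first derivation; B returns the intended
-- empty left-hand side for that malformed leading arrow.
def D_read_one_state (words : List String) : Prop :=
  words.head? = some "->" ∧ words.getLast? ≠ some ""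
instance (words : List String) : Decidable (D_read_one_state words) := by unfold D_read_one_state; infer_instance

def Spec_read_one_state (words : List String) (out : List (String × String)) : Prop :=
  ¬ D_read_one_state words → out = read_one_state_alt words
instance (words : List String) (out : List (String × String)) : Decidable (Spec_read_one_state words out) := by unfold Spec_read_one_state; infer_instance

def pvDiffWitness_read_one_state : List String := ["->", "E,", "x"]
def pvDiffWitnessOut_read_one_state : (List (String × String)) × (List (String × String)) :=
  ([("x -> E", "x")], [(" -> E", "x")])

-- ===== CLAIM (what is proved, stated in full; the proofs are below) =====
def Claim_unchanged_read_one_state : Prop := ∀ (words : List String), Dom_read_one_state words → Pre_read_one_state words → Spec_read_one_state words (read_one_state words)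
def Claim_changed_read_one_state : Prop := Dom_read_one_state (pvDiffWitness_read_one_state) ∧ Pre_read_one_state (pvDiffWitness_read_one_state) ∧ D_read_one_state (pvDiffWitness_read_one_state) ∧ read_one_state (pvDiffWitness_read_one_state) = pvDiffWitnessOut_read_one_state.1 ∧ read_one_state_alt (pvDiffWitness_read_one_state) = pvDiffWitnessOut_read_one_state.2 ∧ pvDiffWitnessOut_read_one_state.1 ≠ pvDiffWitnessOut_read_one_state.2
def Claim_exact_read_one_state : Prop := ∀ (words : List String), Dom_read_one_state words → Pre_read_one_state words → D_read_one_state words → read_one_state words ≠ read_one_state_alt words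

-- ===== LEMMAS AND PROOFS =====

-- the arrow positions of B, with a general enumerate start
def pvAF (words : List String) (s : Int) : List Int :=
  ((PySem.List.enumerate words s).filter (fun p => p.2 == "->")).map (fun p => p.1)

-- the arrows at positions ≥ t
def pvAFge (words : List String) (t : Int) : List Int :=
  (pvAF words 0).filter (fun a => decide (t ≤ a))

-- the (der, look) pair A builds for an arrow with lookahead next
def pvEntry (words : List String) (arrow next : Int) : String × String :=
  (PySem.List.pyGetD words (arrow - 1) "" ++ " -> " ++
     PySem.Str.slice (PySem.List.pyGetD words (arrow + 1) "") none (some (-1)),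
   if next ≠ -1 then
     PySem.Str.slice (PySem.Str.join " " (PySem.List.slice words (some (arrow + 2)) (some (next - 1)))) none (some (-1))
   else PySem.Str.join " " (PySem.List.slice words (some (arrow + 2)) none))

def pvLookmap (words : List String) : List Int → List (String × String)
  | [] => []
  | a :: rest => pvEntry words a (rest.headD (-1)) :: pvLookmap words rest

-- reference recursion for B's state machine (proof helper; mirrors the three modes)
mutual
def pvGoScan (prev : String) : List String → List (String × String)
  | [] => []
  | w :: ws => if w = "->" then pvGoTo prev ws else pvGoScan w ws
def pvGoTo (lhs : String) : List String → List (String × String)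
  | [] => []
  | t :: ws =>
    if t = "->" then
      (lhs ++ " -> " ++ PySem.Str.slice t none (some (-1)),
       PySem.Str.slice (PySem.Str.join " " (PySem.List.slice ([] : List String) none (some (-1)))) none (some (-1)))
        :: pvGoTo "->" ws
    else pvGoLook (lhs ++ " -> " ++ PySem.Str.slice t none (some (-1))) [] t ws
def pvGoLook (der : String) (toks : List String) (prev : String) : List String → List (String × String)
  | [] => [(der, PySem.Str.join " " toks)]
  | w :: ws =>
    if w = "->" then
      (der, PySem.Str.slice (PySem.Str.join " " (PySem.List.slice toks none (some (-1)))) none (some (-1)))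
        :: pvGoTo prev ws
    else pvGoLook der (toks ++ [w]) w ws
end

theorem pvAF_cons (w : String) (ws : List String) (s : Int) :
    pvAF (w :: ws) s = (if w == "->" then [s] else []) ++ pvAF ws (s + 1) := by
  by_cases h : w == "->" <;>
    simp [pvAF, PySem.List.enumerate_cons, h]

theorem pvAF_ge (words : List String) (s : Int) : ∀ x ∈ pvAF words s, s ≤ x := by
  intro x hx
  simp only [pvAF, List.mem_map, List.mem_filter] at hx
  obtain ⟨p, ⟨hp, _⟩, rfl⟩ := hx
  rw [PySem.List.mem_enumerate_iff] at hp
  obtain ⟨k, _, rfl⟩ := hp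
  simp

theorem pvAF_pairwise (words : List String) (s : Int) : (pvAF words s).Pairwise (· < ·) := by
  exact List.Pairwise.map _ (fun _ _ h => h)
    (List.Pairwise.filter _ (PySem.List.pairwise_lt_enumerate words s))

theorem pvHeadF (words : List String) : ∀ (n : Nat) (s : Int),
    (match PySem.List.index? (words.drop n) "->" with
      | none => (-1 : Int)
      | some k => (k : Int) + n + s)
    = (((pvAF words s).filter (fun a => decide ((n : Int) + s ≤ a))).headD (-1)) := by
  induction words with
  | nil => intro n s; simp [pvAF, PySem.List.enumerate_nil, PySem.List.index?]
  | cons w ws ih =>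
    intro n s
    rw [pvAF_cons]
    cases n with
    | zero =>
      by_cases hw : w = "->"
      · subst hw
        simp only [List.drop_zero]
        rw [PySem.List.index?_cons_self]
        simp
      · have hrw : (if (w == "->") = true then [s] else []) = ([] : List Int) := by
          simp [hw]
        rw [hrw, List.nil_append]
        simp only [List.drop_zero]
        rw [PySem.List.index?_cons_of_ne ws hw]
        have hfe : List.filter (fun a => decide (((0 : Nat) : Int) + s ≤ a)) (pvAF ws (s + 1))
            = List.filter (fun a => decide (((0 : Nat) : Int) + (s + 1) ≤ a)) (pvAF ws (s + 1)) := by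
          rw [List.filter_eq_self.mpr, List.filter_eq_self.mpr]
          · intro a ha; have := pvAF_ge ws (s + 1) a ha; simp; omega
          · intro a ha; have := pvAF_ge ws (s + 1) a ha; simp; omega
        rw [hfe]
        have this' := ih 0 (s + 1)
        simp only [List.drop_zero] at this'
        cases h : PySem.List.index? ws "->" <;>
          simp only [h, Option.map_some, Option.map_none] at this' ⊢
        · exact this'
        · rw [← this']; push_cast; ring
    | succ m =>
      have hfc : (fun a : Int => decide (((m + 1 : Nat) : Int) + s ≤ a))
          = (fun a : Int => decide ((m : Int) + (s + 1) ≤ a)) := by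
        funext a
        have hiff : ((m + 1 : Nat) : Int) + s ≤ a ↔ (m : Int) + (s + 1) ≤ a := by
          push_cast; omega
        exact decide_eq_decide.mpr hiff
      simp only [List.drop_succ_cons]
      rw [List.filter_append, hfc]
      have hs0 : List.filter (fun a : Int => decide ((m : Int) + (s + 1) ≤ a))
          (if (w == "->") = true then [s] else []) = [] := by
        by_cases hw : (w == "->") = true
        · simp [hw]; omega
        · simp [hw]
      rw [hs0, List.nil_append]
      have this' := ih m (s + 1)
      cases h : PySem.List.index? (ws.drop m) "->" <;> simp only [h] at this' ⊢
      · exact this'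
      · rw [← this']; push_cast; ring

theorem pvIndexFrom_eq (words : List String) (t : Int) (ht : 0 ≤ t) :
    pvIndexFrom words "->" t = ((pvAF words 0).filter (fun a => decide (t ≤ a))).headD (-1) := by
  have h := pvHeadF words t.toNat 0
  have hc : ((t.toNat : Int)) = t := Int.toNat_of_nonneg ht
  simp only [hc, add_zero] at h
  unfold pvIndexFrom
  exact h

theorem pvFiltTail : ∀ (L : List Int), L.Pairwise (· < ·) → ∀ (t a : Int) (rest : List Int),
    L.filter (fun x => decide (t ≤ x)) = a :: rest →
    rest = L.filter (fun x => decide (a + 1 ≤ x)) := by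
  intro L hL
  induction L with
  | nil => intro t a rest h; simp at h
  | cons x L' ih =>
    intro t a rest h
    have hx : ∀ y ∈ L', x < y := (List.pairwise_cons.mp hL).1
    have hL' := (List.pairwise_cons.mp hL).2
    by_cases hxt : t ≤ x
    · rw [List.filter_cons_of_pos (by simpa using hxt)] at h
      obtain ⟨rfl, hrest⟩ : x = a ∧ L'.filter (fun x => decide (t ≤ x)) = rest := by
        constructor <;> [exact (List.cons.injEq .. ▸ h).1; exact (List.cons.injEq .. ▸ h).2]
      rw [List.filter_cons_of_neg (by simp)]
      rw [← hrest]
      rw [List.filter_eq_self.mpr, List.filter_eq_self.mpr]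
      · intro y hy; have := hx y hy; simp; omega
      · intro y hy; have := hx y hy; simp; omega
    · rw [List.filter_cons_of_neg (by simpa using hxt)] at h
      have hr := ih hL' t a rest h
      have ha : a ∈ L' := by
        have : a ∈ L'.filter (fun x => decide (t ≤ x)) := by rw [h]; exact List.mem_cons_self
        exact List.mem_of_mem_filter this
      rw [List.filter_cons_of_neg (by have := hx a ha; simp; omega)]
      exact hr

theorem pvLoopA_eq (words : List String) : ∀ (l : List Int) (t : Int),
    l = (pvAF words 0).filter (fun a => decide (t ≤ a)) →
    ∀ (fuel : Nat), l.length ≤ fuel → ∀ (acc : List (String × String)),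
    loopA words fuel (l.headD (-1)) acc = acc ++ pvLookmap words l := by
  intro l
  induction l with
  | nil =>
    intro t _ fuel _ acc
    cases fuel <;> simp [loopA, pvLookmap]
  | cons a rest ih =>
    intro t hl fuel hf acc
    have ha0 : (0 : Int) ≤ a := by
      have : a ∈ (pvAF words 0).filter (fun a => decide (t ≤ a)) := by
        rw [← hl]; exact List.mem_cons_self
      exact pvAF_ge words 0 a (List.mem_of_mem_filter this)
    have hrest : rest = (pvAF words 0).filter (fun x => decide (a + 1 ≤ x)) :=
      pvFiltTail (pvAF words 0) (pvAF_pairwise words 0) t a rest hl.symm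
    cases fuel with
    | zero => simp at hf
    | succ f =>
      have hne : ¬ ((a :: rest).headD (-1) = -1) := by simp; omega
      rw [loopA, if_neg hne]
      have hnext : pvIndexFrom words "->" ((a :: rest).headD (-1) + 1) = rest.headD (-1) := by
        simp only [List.headD_cons]
        rw [pvIndexFrom_eq words (a + 1) (by omega), ← hrest]
      rw [hnext]
      have := ih (a + 1) hrest f (by simpa using Nat.lt_succ_iff.mp (Nat.lt_of_lt_of_le (by simp) hf)) (acc ++ [pvEntry words a (rest.headD (-1))])
      simp only [List.headD_cons]
      calc loopA words f (rest.headD (-1))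
              (acc ++ [pvEntry words a (rest.headD (-1))])
          = (acc ++ [pvEntry words a (rest.headD (-1))]) ++ pvLookmap words rest := this
        _ = acc ++ pvLookmap words (a :: rest) := by simp [pvLookmap, pvEntry]

theorem pvArrows_filter_zero (words : List String) :
    (pvAF words 0).filter (fun a => decide ((0 : Int) ≤ a)) = pvAF words 0 :=
  List.filter_eq_self.mpr (fun a ha => by have := pvAF_ge words 0 a ha; simp; omega)

theorem pvArrows_len_le (words : List String) : (pvAF words 0).length ≤ words.length := by
  calc (pvAF words 0).length
      = (((PySem.List.enumerate words 0).filter (fun p => p.2 == "->"))).length := by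
        simp [pvAF]
    _ ≤ (PySem.List.enumerate words 0).length := List.length_filter_le _ _
    _ = words.length := PySem.List.length_enumerate words 0

-- A's characterization: A = lookmap over all arrow positions
theorem pvA_char (words : List String) :
    read_one_state words = pvLookmap words (pvAFge words 0) := by
  unfold read_one_state pvAFge
  rw [pvIndexFrom_eq words 0 le_rfl]
  rw [pvLoopA_eq words ((pvAF words 0).filter (fun a => decide ((0:Int) ≤ a))) 0 rfl
        (words.length + 1)
        (by rw [pvArrows_filter_zero]; have := pvArrows_len_le words; omega) []]
  simp

-- membership of a position in the arrow list
theorem pvMem_pvAF_iff (words : List String) (n : Nat) :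
    ((n : Int) ∈ pvAF words 0) ↔ words[n]? = some "->" := by
  simp only [pvAF, List.mem_map, List.mem_filter]
  constructor
  · rintro ⟨p, ⟨hp, hv⟩, hfst⟩
    rw [PySem.List.mem_enumerate_iff] at hp
    obtain ⟨k, hk, rfl⟩ := hp
    simp only [zero_add] at hfst
    have : k = n := by exact_mod_cast hfst
    subst this
    simp only [beq_iff_eq] at hv
    simp [List.getElem?_eq_getElem hk, hv]
  · intro h
    have hk : n < words.length := by
      by_contra hh
      rw [List.getElem?_eq_none (by omega)] at h; cases h
    refine ⟨((n : Int), words[n]), ⟨?_, ?_⟩, rfl⟩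
    · rw [PySem.List.mem_enumerate_iff]
      exact ⟨n, hk, by simp⟩
    · simp only [beq_iff_eq]
      have := List.getElem?_eq_getElem hk
      rw [this] at h; exact Option.some.inj h

theorem pvAF_lt (words : List String) : ∀ x ∈ pvAF words 0, x < (words.length : Int) := by
  intro x hx
  simp only [pvAF, List.mem_map, List.mem_filter] at hx
  obtain ⟨p, ⟨hp, _⟩, rfl⟩ := hx
  rw [PySem.List.mem_enumerate_iff] at hp
  obtain ⟨k, hk, rfl⟩ := hp
  simp; omega

-- pvAFge at the end of the list is empty
theorem pvAFge_len (words : List String) : pvAFge words (words.length : Int) = [] := by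
  unfold pvAFge
  rw [List.filter_eq_nil_iff]
  intro a ha
  have := pvAF_lt words a ha
  simp; omega

-- skipping a non-arrow position
theorem pvAFge_skip (words : List String) (n : Nat) (h : words[n]? ≠ some "->") :
    pvAFge words (n : Int) = pvAFge words ((n : Int) + 1) := by
  unfold pvAFge
  apply List.filter_congr
  intro a ha
  have hne : a ≠ (n : Int) := by
    intro hEq; subst hEq
    exact h ((pvMem_pvAF_iff words n).mp ha)
  apply decide_eq_decide.mpr
  omega

-- peeling an arrow position
theorem pvAFge_cons (words : List String) (n : Nat) (h : words[n]? = some "->") :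
    pvAFge words (n : Int) = (n : Int) :: pvAFge words ((n : Int) + 1) := by
  have hmem : (n : Int) ∈ pvAFge words (n : Int) := by
    unfold pvAFge
    rw [List.mem_filter]
    exact ⟨(pvMem_pvAF_iff words n).mpr h, by simp⟩
  have hpw : (pvAFge words (n : Int)).Pairwise (· < ·) :=
    List.Pairwise.filter _ (pvAF_pairwise words 0)
  cases hl : pvAFge words (n : Int) with
  | nil => rw [hl] at hmem; simp at hmem
  | cons b r =>
    have hbmem : b ∈ pvAFge words (n : Int) := by rw [hl]; exact List.mem_cons_self
    have hbge : (n : Int) ≤ b := by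
      unfold pvAFge at hbmem
      rw [List.mem_filter] at hbmem
      simpa using hbmem.2
    have hb : b = (n : Int) := by
      rw [hl] at hmem hpw
      rcases List.mem_cons.mp hmem with h1 | h2
      · omega
      · have := (List.pairwise_cons.mp hpw).1 _ h2; omega
    rw [hb] at hl ⊢
    have hr : r = (pvAF words 0).filter (fun x => decide ((n : Int) + 1 ≤ x)) :=
      pvFiltTail (pvAF words 0) (pvAF_pairwise words 0) ((n : Int)) ((n : Int)) r hl
    rw [hr]; rfl


-- finishing step of Source B after the loop
def pvFin (s : List (String × String) × String × String × String × List String × String) : List (String × String) :=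
  match s with
  | (out, _, _, der, toks, mode) =>
    if mode = "look" then out ++ [(der, PySem.Str.join " " toks)] else out

theorem pvAlt_eq (words : List String) :
    read_one_state_alt words = pvFin (words.foldl stepB ([], "", "", "", [], "scan")) := rfl

-- the foldl of port B computes the reference recursion, mode by mode
theorem pvBridge : ∀ (ws : List String),
    (∀ out prev lhs der toks,
      pvFin (ws.foldl stepB (out, prev, lhs, der, toks, "scan")) = out ++ pvGoScan prev ws)
    ∧ (∀ out lhs der toks,
      pvFin (ws.foldl stepB (out, "->", lhs, der, toks, "to")) = out ++ pvGoTo lhs ws)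
    ∧ (∀ out prev lhs der toks,
      pvFin (ws.foldl stepB (out, prev, lhs, der, toks, "look")) = out ++ pvGoLook der toks prev ws) := by
  intro ws
  induction ws with
  | nil =>
    refine ⟨?_, ?_, ?_⟩ <;> intros <;> simp [pvFin, pvGoScan, pvGoTo, pvGoLook]
  | cons w ws ih =>
    obtain ⟨ihS, ihT, ihL⟩ := ih
    refine ⟨?_, ?_, ?_⟩
    · intro out prev lhs der toks
      by_cases hw : w = "->"
      · subst hw
        simp only [List.foldl_cons, stepB]
        simp [ihT, pvGoScan]
      · simp only [List.foldl_cons, stepB]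
        simp [hw, ihS, pvGoScan]
    · intro out lhs der toks
      by_cases hw : w = "->"
      · subst hw
        simp only [List.foldl_cons, stepB]
        simp [ihT, pvGoTo]
      · simp only [List.foldl_cons, stepB]
        simp [hw, ihL, pvGoTo]
    · intro out prev lhs der toks
      by_cases hw : w = "->"
      · subst hw
        simp only [List.foldl_cons, stepB]
        simp [ihT, pvGoLook]
      · simp only [List.foldl_cons, stepB]
        simp [hw, ihL, pvGoLook]

theorem pvAltChar (words : List String) : read_one_state_alt words = pvGoScan "" words := by
  rw [pvAlt_eq]
  simpa using (pvBridge words).1 [] "" "" "" []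


-- position/word helpers for a decomposition words = pre ++ w :: ws
theorem pvGet?_append (pre : List String) (w : String) (ws : List String) :
    (pre ++ w :: ws)[pre.length]? = some w := by
  rw [List.getElem?_append_right (le_refl _)]
  simp

theorem pvGetD_of_get? (words : List String) (k : Nat) (v : String) (h : words[k]? = some v) :
    PySem.List.pyGetD words ((k : Nat) : Int) "" = v := by
  rw [PySem.List.pyGetD_natCast, List.getD_eq_getElem?_getD, h]
  rfl

theorem pvDropLast_take (l : List String) (i : Nat) (h : i ≤ l.length) :
    (l.take i).dropLast = l.take (i - 1) := by
  rw [List.dropLast_eq_take, List.take_take, List.length_take]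
  congr 1
  omega


-- the main correspondence: the reference state machine computes A's lookmap, mode by mode
set_option maxHeartbeats 1000000 in
theorem pvMain (words : List String) (hPre : words.getLast? ≠ some "->") : ∀ ws : List String,
    (∀ (pre : List String) (prev : String), pre ++ ws = words →
       (ws.head? = some "->" → prev = PySem.List.pyGetD words ((pre.length : Int) - 1) "") →
       pvGoScan prev ws = pvLookmap words (pvAFge words (pre.length : Int)))
    ∧ (∀ (pre : List String) (lhs : String), pre ++ ws = words → 1 ≤ pre.length →
       words[pre.length - 1]? = some "->" →
       pvGoTo lhs ws =
         (lhs ++ " -> " ++ PySem.Str.slice (PySem.List.pyGetD words ((pre.length : Int)) "") none (some (-1)),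
          (pvEntry words ((pre.length : Int) - 1) ((pvAFge words (pre.length : Int)).headD (-1))).2)
           :: pvLookmap words (pvAFge words (pre.length : Int)))
    ∧ (∀ (pre : List String) (a : Nat) (der : String) (toks : List String) (prev : String),
       pre ++ ws = words → a + 2 ≤ pre.length →
       toks = (words.drop (a + 2)).take (pre.length - (a + 2)) →
       pvAFge words ((a : Int) + 1) = pvAFge words (pre.length : Int) →
       prev = PySem.List.pyGetD words ((pre.length : Int) - 1) "" →
       pvGoLook der toks prev ws =
         (der, (pvEntry words (a : Int) ((pvAFge words (pre.length : Int)).headD (-1))).2)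
           :: pvLookmap words (pvAFge words (pre.length : Int))) := by
  intro ws
  induction ws with
  | nil =>
    refine ⟨?_, ?_, ?_⟩
    · intro pre prev hw _
      have hpre : pre = words := by simpa using hw
      subst hpre
      rw [pvGoScan, pvAFge_len, pvLookmap]
    · intro pre lhs hw h1 harr
      exfalso
      have hpre : pre = words := by simpa using hw
      subst hpre
      exact hPre (by rw [List.getLast?_eq_getElem?]; exact harr)
    · intro pre a der toks prev hw ha htoks hAF hprev
      have hpre : pre = words := by simpa using hw
      subst hpre
      have hslice : PySem.List.slice pre (some ((a : Int) + 2)) none = pre.drop (a + 2) := by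
        have h2 : ((a : Int) + 2) = (((a + 2 : Nat)) : Int) := by push_cast; ring
        rw [h2, PySem.List.slice_from_natCast]
      have htoks' : toks = pre.drop (a + 2) := by
        rw [htoks, List.take_of_length_le (by simp)]
      have hE : (pvEntry pre ((a : Nat) : Int) ((pvAFge pre ((pre.length : Nat) : Int)).headD (-1))).2
          = PySem.Str.join " " toks := by
        rw [pvAFge_len]
        unfold pvEntry
        rw [if_neg (by simp), hslice, ← htoks']
      rw [pvGoLook, pvAFge_len, pvLookmap, ← hE, pvAFge_len]
  | cons w ws ih =>
    obtain ⟨ihS, ihT, ihL⟩ := ih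
    refine ⟨?_, ?_, ?_⟩
    · -- scan mode
      intro pre prev hw hprev
      have hget : words[pre.length]? = some w := by rw [← hw]; exact pvGet?_append pre w ws
      have hw' : (pre ++ [w]) ++ ws = words := by simpa using hw
      have hc1 : (((pre ++ [w]).length : Int)) = (pre.length : Int) + 1 := by
        simp only [List.length_append, List.length_cons, List.length_nil]; push_cast; ring
      by_cases hwArr : w = "->"
      · subst hwArr
        rw [pvGoScan, if_pos rfl]
        rw [ihT (pre ++ ["->"]) prev hw' (by simp) (by simpa using hget)]
        rw [pvAFge_cons words pre.length hget, pvLookmap]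
        rw [hc1]
        have hprev' := hprev rfl
        rw [show ((pre.length : Int) + 1 - 1) = ((pre.length : Int)) from by ring]
        congr 1
        rw [hprev']
        rfl
      · rw [pvGoScan, if_neg hwArr]
        have hgetne : words[pre.length]? ≠ some "->" := by
          rw [hget]; intro hcc; exact hwArr (Option.some.inj hcc)
        rw [pvAFge_skip words pre.length hgetne]
        rw [show ((pre.length : Int) + 1) = (((pre ++ [w]).length : Nat) : Int) from hc1.symm]
        apply ihS (pre ++ [w]) w hw'
        intro _
        rw [hc1]
        rw [show ((pre.length : Int) + 1 - 1) = ((pre.length : Nat) : Int) from by ring]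
        rw [pvGetD_of_get? words pre.length w hget]
    · -- to mode
      intro pre lhs hw h1 harr
      have hget : words[pre.length]? = some w := by rw [← hw]; exact pvGet?_append pre w ws
      have hw' : (pre ++ [w]) ++ ws = words := by simpa using hw
      have hc1 : (((pre ++ [w]).length : Int)) = (pre.length : Int) + 1 := by
        simp only [List.length_append, List.length_cons, List.length_nil]; push_cast; ring
      have hgd : PySem.List.pyGetD words ((pre.length : Int)) "" = w :=
        pvGetD_of_get? words pre.length w hget
      have hgdm1 : PySem.List.pyGetD words ((pre.length : Int) - 1) "" = "->" := by
        rw [show ((pre.length : Int) - 1) = (((pre.length - 1 : Nat)) : Int) from by omega]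
        exact pvGetD_of_get? words (pre.length - 1) "->" harr
      by_cases hwArr : w = "->"
      · subst hwArr
        rw [pvGoTo, if_pos rfl]
        rw [ihT (pre ++ ["->"]) "->" hw' (by simp) (by simpa using hget)]
        rw [pvAFge_cons words pre.length hget, pvLookmap, List.headD_cons, hc1]
        rw [show ((pre.length : Int) + 1 - 1) = ((pre.length : Int)) from by ring]
        have hempty : PySem.List.slice words (some ((pre.length : Int) - 1 + 2)) (some ((pre.length : Int) - 1)) = [] := by
          rw [PySem.List.slice_toNat words (by omega) (by omega)]
          rw [show (((pre.length : Int) - 1).toNat - ((pre.length : Int) - 1 + 2).toNat) = 0 from by omega,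
             List.take_zero]
        have hE1 : (pvEntry words ((pre.length : Int) - 1) ((pre.length : Int))).2
            = PySem.Str.slice (PySem.Str.join " " (PySem.List.slice ([] : List String) none (some (-1)))) none (some (-1)) := by
          unfold pvEntry
          rw [if_pos (by omega)]
          rw [hempty]
          rfl
        rw [hE1, hgd, ← hgdm1]
        rfl
      · rw [pvGoTo, if_neg hwArr]
        have hgetne : words[pre.length]? ≠ some "->" := by
          rw [hget]; intro hcc; exact hwArr (Option.some.inj hcc)
        have hAF : pvAFge words (((pre.length - 1 : Nat) : Int) + 1) = pvAFge words (((pre ++ [w]).length : Nat) : Int) := by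
          rw [show (((pre.length - 1 : Nat)) : Int) + 1 = ((pre.length : Nat) : Int) from by omega]
          rw [pvAFge_skip words pre.length hgetne]
          congr 1
          rw [hc1]
        rw [ihL (pre ++ [w]) (pre.length - 1) (lhs ++ " -> " ++ PySem.Str.slice w none (some (-1))) [] w hw'
              (by simp; omega)
              (by rw [show ((pre ++ [w]).length - (pre.length - 1 + 2)) = 0 from by simp; omega, List.take_zero])
              hAF
              (by rw [show (((pre ++ [w]).length : Int) - 1) = ((pre.length : Nat) : Int) from by rw [hc1]; ring,
                     pvGetD_of_get? words pre.length w hget])]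
        rw [hc1, ← pvAFge_skip words pre.length hgetne]
        rw [pvGetD_of_get? words pre.length w hget]
        rw [show ((pre.length - 1 : Nat) : Int) = ((pre.length : Int) - 1) from by omega]
    · -- look mode
      intro pre a der toks prev hw ha htoks hAF hprev
      have hget : words[pre.length]? = some w := by rw [← hw]; exact pvGet?_append pre w ws
      have hw' : (pre ++ [w]) ++ ws = words := by simpa using hw
      have hlen : pre.length < words.length := by rw [← hw]; simp
      have hc1 : (((pre ++ [w]).length : Int)) = (pre.length : Int) + 1 := by
        simp only [List.length_append, List.length_cons, List.length_nil]; push_cast; ring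
      by_cases hwArr : w = "->"
      · subst hwArr
        rw [pvGoLook, if_pos rfl]
        rw [ihT (pre ++ ["->"]) prev hw' (by simp) (by simpa using hget)]
        rw [pvAFge_cons words pre.length hget, pvLookmap, List.headD_cons, hc1]
        rw [show ((pre.length : Int) + 1 - 1) = ((pre.length : Int)) from by ring]
        have hE : (pvEntry words ((a : Nat) : Int) ((pre.length : Int))).2
            = PySem.Str.slice (PySem.Str.join " " (PySem.List.slice toks none (some (-1)))) none (some (-1)) := by
          unfold pvEntry
          rw [if_pos (by omega)]
          have hsl : PySem.List.slice words (some ((a : Int) + 2)) (some ((pre.length : Int) - 1))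
              = (words.drop (a + 2)).take (pre.length - 1 - (a + 2)) := by
            rw [show ((a : Int) + 2) = (((a + 2 : Nat)) : Int) from by push_cast; ring,
               show ((pre.length : Int) - 1) = (((pre.length - 1 : Nat)) : Int) from by omega,
               PySem.List.slice_natCast]
          rw [hsl, PySem.List.slice_to_neg_one, htoks,
             pvDropLast_take (words.drop (a + 2)) (pre.length - (a + 2)) (by rw [List.length_drop]; omega),
             show (pre.length - (a + 2) - 1) = (pre.length - 1 - (a + 2)) from by omega]
        rw [hE, hprev]
        rfl
      · rw [pvGoLook, if_neg hwArr]
        have hgetne : words[pre.length]? ≠ some "->" := by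
          rw [hget]; intro hcc; exact hwArr (Option.some.inj hcc)
        have hAF2 : pvAFge words ((pre.length : Int)) = pvAFge words ((pre.length : Int) + 1) :=
          pvAFge_skip words pre.length hgetne
        have hdrop : words.drop (a + 2) = pre.drop (a + 2) ++ w :: ws := by
          rw [← hw, List.drop_append_of_le_length (by omega)]
        have hlp : (pre.drop (a + 2)).length = pre.length - (a + 2) := by
          rw [List.length_drop]
        have ht1 : toks = pre.drop (a + 2) := by
          rw [htoks, hdrop, ← hlp, List.take_left]
        have htoks' : toks ++ [w] = (words.drop (a + 2)).take ((pre ++ [w]).length - (a + 2)) := by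
          rw [show ((pre ++ [w]).length - (a + 2)) = (pre.drop (a + 2)).length + 1 from by simp; omega]
          rw [hdrop, List.take_length_add_append, ht1]
          simp
        rw [ihL (pre ++ [w]) a der (toks ++ [w]) w hw'
              (by simp; omega) htoks'
              (by rw [hAF, hAF2]; congr 1; rw [hc1])
              (by rw [show (((pre ++ [w]).length : Int) - 1) = ((pre.length : Nat) : Int) from by rw [hc1]; ring,
                     pvGetD_of_get? words pre.length w hget])]
        rw [hc1, ← hAF2]

-- ===== VERDICT (by name: the statement is the Claim_ definition above) =====
-- A = B outside D_: put the three characterizations together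
theorem pvUnchanged (words : List String) (hPre : words.getLast? ≠ some "->")
    (hD : ¬ D_read_one_state words) : read_one_state words = read_one_state_alt words := by
  rw [pvA_char words, pvAltChar words]
  have hprev : words.head? = some "->" → ("" : String) = PySem.List.pyGetD words (((([] : List String).length : Nat) : Int) - 1) "" := by
    intro hh
    have hne : words ≠ [] := by intro h0; rw [h0] at hh; cases hh
    have hlast : words.getLast? = some "" := by
      unfold D_read_one_state at hD
      push Not at hD
      exact hD hh
    have hcast : ((((([] : List String).length : Nat)) : Int) - 1) = (-1 : Int) := by simp
    rw [hcast, PySem.List.pyGetD_neg_one words "" hne]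
    have := List.getLast?_eq_some_getLast hne
    rw [this] at hlast
    exact (Option.some.inj hlast).symm
  have hS := ((pvMain words hPre words).1 [] "" (by simp) hprev).symm
  have hc : (((([] : List String).length : Nat)) : Int) = (0 : Int) := by simp
  rw [hc] at hS
  exact hS

theorem read_one_state_spec : Claim_unchanged_read_one_state := by
  intro words _ hPre hD
  exact pvUnchanged words hPre hD
theorem read_one_state_changed : Claim_changed_read_one_state := by
  unfold Claim_changed_read_one_state; decide
theorem read_one_state_tight : Claim_exact_read_one_state := by
  intro words _ hPre hD heq
  obtain ⟨hhead, hlast⟩ := hD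
  cases words with
  | nil => cases hhead
  | cons w0 rest =>
    have hw0 : w0 = "->" := by simpa using hhead
    subst hw0
    cases rest with
    | nil => exact hPre (by simp)
    | cons t rest2 =>
      rw [pvA_char, pvAltChar] at heq
      rw [pvGoScan, if_pos rfl] at heq
      have hS := (pvMain ("->" :: t :: rest2) hPre (t :: rest2)).2.1 ["->"] ""
        (by simp) (by simp) (by simp)
      rw [hS] at heq
      have hc0 : pvAFge ("->" :: t :: rest2) (0 : Int) = pvAFge ("->" :: t :: rest2) (((0 : Nat) : Int)) := by norm_num
      rw [hc0, pvAFge_cons ("->" :: t :: rest2) 0 (by simp), pvLookmap] at heq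
      simp only [List.length_cons, List.length_nil, Nat.cast_zero, Nat.cast_one, zero_add] at heq
      norm_num at heq
      injection heq with h1 _
      norm_num at h1
      have hne : ("->" :: t :: rest2) ≠ [] := by simp
      rw [PySem.List.pyGetD_neg_one ("->" :: t :: rest2) "" hne] at h1
      exact hlast (by rw [List.getLast?_eq_some_getLast hne, h1])
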